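-- pv_equiv track=rewrite | github.com/Aditya-hckr/Probablity | ques_1.py | calc_variance
-- ===== SOURCE A (Python) =====
-- M=1000000007
--
-- def mod_add(a, b):
--     a=(a%M+M)%M
--     b=(b%M+M)%M
--     return (a+b)%M
--
-- def mod_multiply(a, b):
--     a=(a%M+M)%M
--     b=(b%M+M)%M
--     return (a*b)%M
--
-- def mod_divide(a, b):
--     a=(a%M+M)%M
--     b=(b%M+M)%M
--     return mod_multiply(a, pow(b, M-2, M))
--
-- def fact_mod(n):
--     result = 1
--     for i in range(2, n + 1):
--         result = mod_multiply(result, i)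
--     return result
--
-- def calc_variance(t):
--     prob = [[0 for i in range(t + 1)] for j in range(t + 1)]
--
--     prob[1][1] = 1
--     prob[1][2] = mod_divide(1, 2)
--     prob[2][1] = mod_divide(1, 2)
--
--     for i in range(2, t + 1):
--         prob[i][1] = mod_divide(1, fact_mod(i))
--     for i in range(2, t + 1):
--         prob[1][i] = mod_divide(1, fact_mod(i))
--
--     for i in range(2, t + 1):
--         for j in range(2, t + 1):
--             term1 = mod_multiply(prob[i-1][j], mod_divide(j, (i+j-1)))
--             term2 = mod_multiply(prob[i][j-1], mod_divide(i, (i+j-1)))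
--             prob[i][j] = mod_add(term1, term2)
--
--     Variance=0
--     for y in range(-(t-2), t-1, 2):
--         i=(t+y)//2
--         j=(t-y)//2
--         y=y**2
--         Variance = mod_add(Variance, mod_multiply(y,prob[i][j]))
--     return Variance
-- ===== SOURCE B (Python) =====
-- # Anti-diagonal sweep: keeps only one diagonal of the probability table (O(t) memory).
-- M = 1000000007
--
-- def mod_add(a, b):
--     a = (a % M + M) % M
--     b = (b % M + M) % M
--     return (a + b) % M
--
-- def mod_multiply(a, b):
--     a = (a % M + M) % M
--     b = (b % M + M) % M
--     return (a * b) % M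
--
-- def mod_divide(a, b):
--     a = (a % M + M) % M
--     b = (b % M + M) % M
--     return mod_multiply(a, pow(b, M - 2, M))
--
-- def fact_mod(n):
--     result = 1
--     for i in range(2, n + 1):
--         result = mod_multiply(result, i)
--     return result
--
-- def calc_variance(t):
--     # prev holds the anti-diagonal i + j = d: prev[i] = prob[i][d - i]
--     prev = [0] * (t + 1)
--     for d in range(2, t + 1):
--         cur = [0] * (t + 1)
--         for i in range(1, d):
--             j = d - i
--             if i == 1 and j == 1:
--                 cur[i] = 1
--             elif i == 1:
--                 cur[i] = mod_divide(1, fact_mod(j))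
--             elif j == 1:
--                 cur[i] = mod_divide(1, fact_mod(i))
--             else:
--                 cur[i] = mod_add(mod_multiply(prev[i - 1], mod_divide(j, d - 1)),
--                                  mod_multiply(prev[i], mod_divide(i, d - 1)))
--         prev = cur
--     Variance = 0
--     for y in range(-(t - 2), t - 1, 2):
--         i = (t + y) // 2
--         Variance = mod_add(Variance, mod_multiply(y * y, prev[i]))
--     return Variance
-- ===== Notes on version B (the rewrite author's own statement) =====
-- stated objective: alternative
-- what changed: B replaces A's full (t+1)x(t+1) probability table (row-by-row nested fill plus two base-row loops) by an anti-diagonal sweep that keeps a single rolling 1-D diagonal array, changing the traversal order and reducing memory from O(t^2) to O(t).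
import Mathlib
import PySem

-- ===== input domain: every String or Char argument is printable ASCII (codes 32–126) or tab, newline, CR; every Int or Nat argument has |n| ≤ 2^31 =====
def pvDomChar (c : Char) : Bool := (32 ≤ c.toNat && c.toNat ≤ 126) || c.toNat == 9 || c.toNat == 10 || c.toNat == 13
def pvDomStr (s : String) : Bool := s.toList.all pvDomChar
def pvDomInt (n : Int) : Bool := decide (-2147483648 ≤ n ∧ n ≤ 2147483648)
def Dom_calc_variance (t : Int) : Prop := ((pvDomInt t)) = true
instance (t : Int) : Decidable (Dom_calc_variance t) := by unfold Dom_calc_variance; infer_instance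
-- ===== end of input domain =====

-- B replaces A's full (t+1)×(t+1) probability table by an anti-diagonal sweep that keeps a single
-- rolling 1-D diagonal (O(t) memory instead of O(t^2)); objective: alternative.

-- ===== PORT A =====
-- shared module helpers (identical in Source A and Source B)
def pyM : Int := 1000000007

def mod_add (a b : Int) : Int :=
  let a := PySem.Int.mod (PySem.Int.mod a pyM + pyM) pyM
  let b := PySem.Int.mod (PySem.Int.mod b pyM + pyM) pyM
  PySem.Int.mod (a + b) pyM

def mod_multiply (a b : Int) : Int :=
  let a := PySem.Int.mod (PySem.Int.mod a pyM + pyM) pyM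
  let b := PySem.Int.mod (PySem.Int.mod b pyM + pyM) pyM
  PySem.Int.mod (a * b) pyM

-- hand-written port of Python's three-argument pow(b, e, m): binary exponentiation, every
-- intermediate reduced with Python's % (PySem.Int.mod). Exact for m > 0 (the only use here is
-- m = pyM): the result is the representative of b^e in [0, m), exactly what pow(b, e, m) returns.
-- (PySem.Int.powMod is the same function, but it evaluates as b^e % m — infeasible for e ≈ 10^9.)
def pow_mod (b : Int) (e : Nat) (m : Int) : Int :=
  if e = 0 then PySem.Int.mod 1 m
  else
    let h := pow_mod b (e / 2) m
    let h2 := PySem.Int.mod (h * h) m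
    if e % 2 = 0 then h2 else PySem.Int.mod (h2 * b) m

-- the exponent M-2 = 1000000005 is a Nat literal here
def mod_divide (a b : Int) : Int :=
  let a := PySem.Int.mod (PySem.Int.mod a pyM + pyM) pyM
  let b := PySem.Int.mod (PySem.Int.mod b pyM + pyM) pyM
  mod_multiply a (pow_mod b 1000000005 pyM)

def fact_mod (n : Int) : Int :=
  (PySem.List.pyRange 2 (n + 1) 1).foldl (fun result i => mod_multiply result i) 1

-- prob[i][j] (read) and prob[i][j] = v (in-place write) on the list-of-lists table. All indices
-- the Python uses are nonnegative and in range when Pre_ holds (t ≥ 2), where getD/set are exact;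
-- outside Pre_ the Python raises IndexError and those inputs are excluded.
def aGet2 (m : List (List Int)) (i j : Nat) : Int := (m.getD i []).getD j 0

def aSet2 (m : List (List Int)) (i j : Nat) (v : Int) : List (List Int) :=
  m.set i ((m.getD i []).set j v)

-- [[0 for i in range(t + 1)] for j in range(t + 1)]
def aInit (t : Int) : List (List Int) :=
  (PySem.List.pyRange 0 (t + 1) 1).map
    (fun _ => (PySem.List.pyRange 0 (t + 1) 1).map (fun _ => (0 : Int)))

-- the table after the prob[1][1]/prob[1][2]/prob[2][1] assignments and the two 1-D fill loops
def aBase (t : Int) : List (List Int) :=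
  let prob := aInit t
  let prob := aSet2 prob 1 1 1
  let prob := aSet2 prob 1 2 (mod_divide 1 2)
  let prob := aSet2 prob 2 1 (mod_divide 1 2)
  let prob := (PySem.List.pyRange 2 (t + 1) 1).foldl
      (fun p i => aSet2 p i.toNat 1 (mod_divide 1 (fact_mod i))) prob
  (PySem.List.pyRange 2 (t + 1) 1).foldl
      (fun p i => aSet2 p 1 i.toNat (mod_divide 1 (fact_mod i))) prob

-- the doubly nested fill loop
def aFill (t : Int) : List (List Int) :=
  (PySem.List.pyRange 2 (t + 1) 1).foldl
    (fun p i => (PySem.List.pyRange 2 (t + 1) 1).foldl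
      (fun p j => aSet2 p i.toNat j.toNat
        (mod_add (mod_multiply (aGet2 p (i.toNat - 1) j.toNat) (mod_divide j (i + j - 1)))
                 (mod_multiply (aGet2 p i.toNat (j.toNat - 1)) (mod_divide i (i + j - 1))))) p)
    (aBase t)

def calc_variance (t : Int) : Int :=
  let prob := aFill t
  (PySem.List.pyRange (-(t - 2)) (t - 1) 2).foldl
    (fun Variance y =>
      let i := PySem.Int.floordiv (t + y) 2
      let j := PySem.Int.floordiv (t - y) 2
      mod_add Variance (mod_multiply (y ^ 2) (aGet2 prob i.toNat j.toNat)))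
    0

-- ===== PORT B =====
def bGet (c : List Int) (i : Nat) : Int := c.getD i 0

def bSet (c : List Int) (i : Nat) (v : Int) : List Int := c.set i v

-- rolling anti-diagonal: after the d-loop, bGet (bDiag t) i = prob[i][t-i]
def bDiag (t : Int) : List Int :=
  (PySem.List.pyRange 2 (t + 1) 1).foldl
    (fun prev d =>
      (PySem.List.pyRange 1 d 1).foldl
        (fun cur i =>
          let j := d - i
          bSet cur i.toNat
            (if i = 1 ∧ j = 1 then 1
             else if i = 1 then mod_divide 1 (fact_mod j)
             else if j = 1 then mod_divide 1 (fact_mod i)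
             else mod_add (mod_multiply (bGet prev (i.toNat - 1)) (mod_divide j (d - 1)))
                          (mod_multiply (bGet prev i.toNat) (mod_divide i (d - 1)))))
        (List.replicate (t + 1).toNat 0))
    (List.replicate (t + 1).toNat 0)

def calc_variance_alt (t : Int) : Int :=
  let prev := bDiag t
  (PySem.List.pyRange (-(t - 2)) (t - 1) 2).foldl
    (fun Variance y =>
      let i := PySem.Int.floordiv (t + y) 2
      mod_add Variance (mod_multiply (y * y) (bGet prev i.toNat)))
    0

-- ===== PRECONDITION & SPEC =====
-- Pre_ excludes exactly the t ≤ 1 on which Python A raises IndexError (prob[1][1] / prob[1][2]).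
def Pre_calc_variance (t : Int) : Prop := 2 ≤ t
instance (t : Int) : Decidable (Pre_calc_variance t) := by unfold Pre_calc_variance; infer_instance
def pvWitness_calc_variance : Int := 4

def Spec_calc_variance (t : Int) (out : Int) : Prop := out = calc_variance_alt t
instance (t : Int) (out : Int) : Decidable (Spec_calc_variance t out) := by unfold Spec_calc_variance; infer_instance

-- ===== CLAIM (what is proved, stated in full; the proofs are below) =====
def Claim_equal_calc_variance : Prop :=
  ∀ (t : Int), Dom_calc_variance t → Pre_calc_variance t → Spec_calc_variance t (calc_variance t)

-- ===== LEMMAS AND PROOFS =====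

-- square-shape invariant of the table
def Sq (N : Nat) (m : List (List Int)) : Prop :=
  m.length = N ∧ ∀ r ∈ m, r.length = N

theorem row_len {N : Nat} {m : List (List Int)} (h : Sq N m) {a : Nat} (ha : a < N) :
    (m.getD a []).length = N := by
  obtain ⟨h1, h2⟩ := h
  rw [List.getD_eq_getElem m [] (by omega)]
  exact h2 _ (List.getElem_mem _)

theorem sq_aSet2 {N : Nat} {m : List (List Int)} (h : Sq N m) (a b : Nat) (v : Int) :
    Sq N (aSet2 m a b v) := by
  by_cases ha : a < N
  · obtain ⟨h1, h2⟩ := h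
    refine ⟨by simp [aSet2, h1], fun r hr => ?_⟩
    rcases List.mem_or_eq_of_mem_set hr with hr' | hr'
    · exact h2 r hr'
    · subst hr'
      rw [List.length_set]
      exact row_len ⟨h1, h2⟩ ha
  · have h1 := h.1
    unfold aSet2
    rw [List.set_eq_of_length_le (by omega)]
    exact h

theorem aGet2_aSet2_ne {m : List (List Int)} {a b i j : Nat} (h : i ≠ a ∨ j ≠ b) (v : Int) :
    aGet2 (aSet2 m a b v) i j = aGet2 m i j := by
  unfold aGet2 aSet2
  simp only [List.getD_eq_getElem?_getD]
  by_cases hia : i = a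
  · subst hia
    have hj : j ≠ b := h.resolve_left (by simp)
    by_cases ha : i < m.length
    · rw [List.getElem?_set_self ha]
      simp only [Option.getD_some]
      rw [List.getElem?_set_ne (Ne.symm hj)]
    · rw [List.set_eq_of_length_le (by omega)]
  · rw [List.getElem?_set_ne (Ne.symm hia)]

theorem aGet2_aSet2_eq {N : Nat} {m : List (List Int)} (h : Sq N m) {a b : Nat}
    (ha : a < N) (hb : b < N) (v : Int) :
    aGet2 (aSet2 m a b v) a b = v := by
  have hm := h.1
  have hrl := row_len h ha
  rw [List.getD_eq_getElem?_getD] at hrl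
  unfold aGet2 aSet2
  simp only [List.getD_eq_getElem?_getD]
  rw [List.getElem?_set_self (show a < m.length by omega), Option.getD_some,
    List.getElem?_set_self (show b < (m[a]?.getD []).length by omega), Option.getD_some]

theorem bGet_bSet_ne {c : List Int} {a i : Nat} (h : i ≠ a) (v : Int) :
    bGet (bSet c a v) i = bGet c i := by
  unfold bGet bSet
  rw [List.getD_eq_getElem?_getD, List.getElem?_set_ne (by omega), ← List.getD_eq_getElem?_getD]

theorem bGet_bSet_eq {c : List Int} {a : Nat} (ha : a < c.length) (v : Int) :
    bGet (bSet c a v) a = v := by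
  unfold bGet bSet
  rw [List.getD_eq_getElem?_getD, List.getElem?_set_self ha]
  rfl

theorem length_bSet (c : List Int) (a : Nat) (v : Int) : (bSet c a v).length = c.length := by
  simp [bSet]

-- the common recursive specification of the probability table: P i j = prob[i][j] (1 ≤ i, j)
def P (i j : Nat) : Int :=
  if i = 0 ∨ j = 0 then 0
  else if i = 1 ∧ j = 1 then 1
  else if i = 1 then mod_divide 1 (fact_mod (j : Int))
  else if j = 1 then mod_divide 1 (fact_mod (i : Int))
  else mod_add (mod_multiply (P (i - 1) j) (mod_divide (j : Int) ((i : Int) + (j : Int) - 1)))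
               (mod_multiply (P i (j - 1)) (mod_divide (i : Int) ((i : Int) + (j : Int) - 1)))
termination_by i + j
decreasing_by all_goals omega

theorem P_one_one : P 1 1 = 1 := by simp [P]

theorem P_one (j : Nat) (h : 2 ≤ j) : P 1 j = mod_divide 1 (fact_mod (j : Int)) := by
  rw [P]; simp [show ¬(j = 0) by omega, show ¬(j = 1) by omega]

theorem P_one' (i : Nat) (h : 2 ≤ i) : P i 1 = mod_divide 1 (fact_mod (i : Int)) := by
  rw [P]; simp [show ¬(i = 0) by omega, show ¬(i = 1) by omega]

theorem P_rec (i j : Nat) (hi : 2 ≤ i) (hj : 2 ≤ j) :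
    P i j = mod_add (mod_multiply (P (i - 1) j) (mod_divide (j : Int) ((i : Int) + (j : Int) - 1)))
                    (mod_multiply (P i (j - 1)) (mod_divide (i : Int) ((i : Int) + (j : Int) - 1))) := by
  rw [P]; simp [show ¬(i = 0) by omega, show ¬(j = 0) by omega,
    show ¬(i = 1) by omega, show ¬(j = 1) by omega]

-- ---- A side ----

theorem sq_aInit (t : Int) : Sq (t + 1).toNat (aInit t) := by
  constructor
  · simp [aInit, PySem.List.length_pyRange_one]
  · intro r hr
    simp only [aInit, List.mem_map] at hr
    obtain ⟨x, _, hx⟩ := hr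
    rw [← hx]
    simp [PySem.List.length_pyRange_one]

theorem fillcol (N : Nat) (hN : 2 ≤ N) :
    ∀ (n : Nat) (p : List (List Int)), n ≤ N → Sq N p →
    Sq N ((PySem.List.pyRange 2 (n : Int) 1).foldl
      (fun p i => aSet2 p i.toNat 1 (mod_divide 1 (fact_mod i))) p) ∧
    ∀ a b : Nat,
      aGet2 ((PySem.List.pyRange 2 (n : Int) 1).foldl
        (fun p i => aSet2 p i.toNat 1 (mod_divide 1 (fact_mod i))) p) a b =
      if b = 1 ∧ 2 ≤ a ∧ a < n then mod_divide 1 (fact_mod (a : Int)) else aGet2 p a b := by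
  intro n
  induction n with
  | zero =>
    intro p _ hp
    rw [PySem.List.pyRange_one_eq_nil (by norm_num)]
    simp only [List.foldl_nil]
    exact ⟨hp, fun a b => by rw [if_neg (by omega)]⟩
  | succ n ih =>
    intro p hn hp
    by_cases h2 : 2 ≤ n
    · obtain ⟨ihs, ihg⟩ := ih p (by omega) hp
      rw [show ((n + 1 : Nat) : Int) = (n : Int) + 1 by push_cast; ring,
        PySem.List.pyRange_one_succ_right (by exact_mod_cast h2), List.foldl_append]
      simp only [List.foldl_cons, List.foldl_nil, Int.toNat_natCast]
      refine ⟨sq_aSet2 ihs n 1 _, fun a b => ?_⟩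
      by_cases hab : a = n ∧ b = 1
      · obtain ⟨ha, hb⟩ := hab
        subst ha; subst hb
        rw [aGet2_aSet2_eq ihs (by omega) (by omega), if_pos ⟨rfl, h2, by omega⟩]
      · rw [aGet2_aSet2_ne (by tauto) _, ihg a b]
        split_ifs with h1' h2' <;> try rfl
        · omega
        · omega
    · rw [PySem.List.pyRange_one_eq_nil (by exact_mod_cast (by omega : ((n : Int) + 1) ≤ 2))]
      simp only [List.foldl_nil]
      exact ⟨hp, fun a b => by rw [if_neg (by omega)]⟩

theorem fillrow (N : Nat) (hN : 2 ≤ N) :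
    ∀ (n : Nat) (p : List (List Int)), n ≤ N → Sq N p →
    Sq N ((PySem.List.pyRange 2 (n : Int) 1).foldl
      (fun p i => aSet2 p 1 i.toNat (mod_divide 1 (fact_mod i))) p) ∧
    ∀ a b : Nat,
      aGet2 ((PySem.List.pyRange 2 (n : Int) 1).foldl
        (fun p i => aSet2 p 1 i.toNat (mod_divide 1 (fact_mod i))) p) a b =
      if a = 1 ∧ 2 ≤ b ∧ b < n then mod_divide 1 (fact_mod (b : Int)) else aGet2 p a b := by
  intro n
  induction n with
  | zero =>
    intro p _ hp
    rw [PySem.List.pyRange_one_eq_nil (by norm_num)]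
    simp only [List.foldl_nil]
    exact ⟨hp, fun a b => by rw [if_neg (by omega)]⟩
  | succ n ih =>
    intro p hn hp
    by_cases h2 : 2 ≤ n
    · obtain ⟨ihs, ihg⟩ := ih p (by omega) hp
      rw [show ((n + 1 : Nat) : Int) = (n : Int) + 1 by push_cast; ring,
        PySem.List.pyRange_one_succ_right (by exact_mod_cast h2), List.foldl_append]
      simp only [List.foldl_cons, List.foldl_nil, Int.toNat_natCast]
      refine ⟨sq_aSet2 ihs 1 n _, fun a b => ?_⟩
      by_cases hab : a = 1 ∧ b = n
      · obtain ⟨ha, hb⟩ := hab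
        subst ha; subst hb
        rw [aGet2_aSet2_eq ihs (by omega) (by omega), if_pos ⟨rfl, h2, by omega⟩]
      · rw [aGet2_aSet2_ne (by tauto) _, ihg a b]
        split_ifs with h1' h2' <;> try rfl
        · omega
        · omega
    · rw [PySem.List.pyRange_one_eq_nil (by exact_mod_cast (by omega : ((n : Int) + 1) ≤ 2))]
      simp only [List.foldl_nil]
      exact ⟨hp, fun a b => by rw [if_neg (by omega)]⟩

theorem aBase_spec (t : Int) (ht : 2 ≤ t) :
    Sq (t + 1).toNat (aBase t) ∧
    (∀ j : Nat, 1 ≤ j → (j : Int) < t + 1 → aGet2 (aBase t) 1 j = P 1 j) ∧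
    (∀ i : Nat, 2 ≤ i → (i : Int) < t + 1 → aGet2 (aBase t) i 1 = P i 1) := by
  have hN : (((t + 1).toNat : Nat) : Int) = t + 1 := Int.toNat_of_nonneg (by omega)
  have hN2 : 2 ≤ (t + 1).toNat := by omega
  have hsq0 : Sq (t + 1).toNat
      (aSet2 (aSet2 (aSet2 (aInit t) 1 1 1) 1 2 (mod_divide 1 2)) 2 1 (mod_divide 1 2)) :=
    sq_aSet2 (sq_aSet2 (sq_aSet2 (sq_aInit t) 1 1 1) 1 2 _) 2 1 _
  obtain ⟨hcs, hcg⟩ := fillcol (t + 1).toNat hN2 (t + 1).toNat _ le_rfl hsq0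
  obtain ⟨hrs, hrg⟩ := fillrow (t + 1).toNat hN2 (t + 1).toNat _ le_rfl hcs
  have hrange : PySem.List.pyRange 2 (t + 1) 1 =
      PySem.List.pyRange 2 (((t + 1).toNat : Nat) : Int) 1 := by rw [hN]
  have hbase : ∀ a b : Nat, aGet2 (aBase t) a b =
      if a = 1 ∧ 2 ≤ b ∧ b < (t + 1).toNat then mod_divide 1 (fact_mod (b : Int))
      else if b = 1 ∧ 2 ≤ a ∧ a < (t + 1).toNat then mod_divide 1 (fact_mod (a : Int))
      else aGet2 (aSet2 (aSet2 (aSet2 (aInit t) 1 1 1) 1 2 (mod_divide 1 2)) 2 1 (mod_divide 1 2)) a b := by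
    intro a b
    show aGet2 ((PySem.List.pyRange 2 (t + 1) 1).foldl _ _) a b = _
    rw [hrange, hrg a b, hcg a b]
  refine ⟨by unfold aBase; rw [hrange]; exact hrs, ?_, ?_⟩
  · intro j hj1 hj2
    rw [hbase 1 j]
    by_cases hj : 2 ≤ j
    · rw [if_pos (show (1:Nat) = 1 ∧ 2 ≤ j ∧ j < (t + 1).toNat from ⟨rfl, hj, by omega⟩)]
      exact (P_one j hj).symm
    · have hj' : j = 1 := by omega
      subst hj'
      rw [if_neg (by omega), if_neg (by omega),
        aGet2_aSet2_ne (by omega) _, aGet2_aSet2_ne (by omega) _,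
        aGet2_aSet2_eq (sq_aInit t) (by omega) (by omega), P_one_one]
  · intro i hi1 hi2
    rw [hbase i 1, if_neg (by omega), if_pos ⟨rfl, hi1, by omega⟩, P_one' i hi1]

-- inner loop: fills row i of the table with P i · (row i-1 being already correct up to N)
theorem innerA (N : Nat) (i : Int) (p : List (List Int)) (hi : 2 ≤ i) (hiN : i.toNat < N)
    (hsq : Sq N p)
    (hrow : ∀ b, 1 ≤ b → b < N → aGet2 p (i.toNat - 1) b = P (i.toNat - 1) b)
    (hcol : aGet2 p i.toNat 1 = P i.toNat 1) :
    ∀ n : Nat, n ≤ N →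
    Sq N ((PySem.List.pyRange 2 (n : Int) 1).foldl
      (fun p j => aSet2 p i.toNat j.toNat
        (mod_add (mod_multiply (aGet2 p (i.toNat - 1) j.toNat) (mod_divide j (i + j - 1)))
                 (mod_multiply (aGet2 p i.toNat (j.toNat - 1)) (mod_divide i (i + j - 1))))) p) ∧
    (∀ a b, a ≠ i.toNat →
      aGet2 ((PySem.List.pyRange 2 (n : Int) 1).foldl
        (fun p j => aSet2 p i.toNat j.toNat
          (mod_add (mod_multiply (aGet2 p (i.toNat - 1) j.toNat) (mod_divide j (i + j - 1)))
                   (mod_multiply (aGet2 p i.toNat (j.toNat - 1)) (mod_divide i (i + j - 1))))) p) a b =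
        aGet2 p a b) ∧
    (∀ b, 1 ≤ b → b < n →
      aGet2 ((PySem.List.pyRange 2 (n : Int) 1).foldl
        (fun p j => aSet2 p i.toNat j.toNat
          (mod_add (mod_multiply (aGet2 p (i.toNat - 1) j.toNat) (mod_divide j (i + j - 1)))
                   (mod_multiply (aGet2 p i.toNat (j.toNat - 1)) (mod_divide i (i + j - 1))))) p) i.toNat b =
        P i.toNat b) := by
  have hiN' : ((i.toNat : Nat) : Int) = i := Int.toNat_of_nonneg (by omega)
  have hi2 : 2 ≤ i.toNat := by omega
  intro n
  induction n with
  | zero =>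
    intro _
    rw [PySem.List.pyRange_one_eq_nil (by norm_num)]
    exact ⟨hsq, fun a b _ => rfl, fun b hb1 hb2 => absurd hb2 (by omega)⟩
  | succ n ih =>
    intro hn
    by_cases h2 : 2 ≤ n
    · obtain ⟨ihs, ih1, ih2⟩ := ih (by omega)
      rw [show ((n + 1 : Nat) : Int) = (n : Int) + 1 by push_cast; ring,
        PySem.List.pyRange_one_succ_right (by exact_mod_cast h2), List.foldl_append]
      simp only [List.foldl_cons, List.foldl_nil, Int.toNat_natCast]
      refine ⟨sq_aSet2 ihs _ _ _, ?_, ?_⟩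
      · intro a b ha
        rw [aGet2_aSet2_ne (Or.inl ha) _, ih1 a b ha]
      · intro b hb1 hb2
        by_cases hbn : b = n
        · subst hbn
          rw [aGet2_aSet2_eq ihs hiN (by omega) _]
          rw [ih1 (i.toNat - 1) b (by omega), hrow b (by omega) (by omega),
              ih2 (b - 1) (by omega) (by omega)]
          rw [P_rec i.toNat b hi2 (by omega)]
          rw [hiN']
        · rw [aGet2_aSet2_ne (Or.inr (by omega)) _, ih2 b hb1 (by omega)]
    · rw [PySem.List.pyRange_one_eq_nil (by exact_mod_cast (by omega : ((n : Int) + 1) ≤ 2))]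
      refine ⟨hsq, fun a b _ => rfl, fun b hb1 hb2 => ?_⟩
      have hb : b = 1 := by omega
      subst hb
      exact hcol

-- outer loop invariant
theorem outerA (N : Nat) (m : List (List Int)) (hsq : Sq N m)
    (h1 : ∀ j, 1 ≤ j → j < N → aGet2 m 1 j = P 1 j)
    (h2 : ∀ i, 2 ≤ i → i < N → aGet2 m i 1 = P i 1) :
    ∀ k : Nat, k ≤ N →
    Sq N ((PySem.List.pyRange 2 (k : Int) 1).foldl
      (fun p i => (PySem.List.pyRange 2 (N : Int) 1).foldl
        (fun p j => aSet2 p i.toNat j.toNat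
          (mod_add (mod_multiply (aGet2 p (i.toNat - 1) j.toNat) (mod_divide j (i + j - 1)))
                   (mod_multiply (aGet2 p i.toNat (j.toNat - 1)) (mod_divide i (i + j - 1))))) p) m) ∧
    (∀ j, 1 ≤ j → j < N →
      aGet2 ((PySem.List.pyRange 2 (k : Int) 1).foldl
        (fun p i => (PySem.List.pyRange 2 (N : Int) 1).foldl
          (fun p j => aSet2 p i.toNat j.toNat
            (mod_add (mod_multiply (aGet2 p (i.toNat - 1) j.toNat) (mod_divide j (i + j - 1)))
                     (mod_multiply (aGet2 p i.toNat (j.toNat - 1)) (mod_divide i (i + j - 1))))) p) m) 1 j =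
        P 1 j) ∧
    (∀ i, 2 ≤ i → i < N →
      aGet2 ((PySem.List.pyRange 2 (k : Int) 1).foldl
        (fun p i => (PySem.List.pyRange 2 (N : Int) 1).foldl
          (fun p j => aSet2 p i.toNat j.toNat
            (mod_add (mod_multiply (aGet2 p (i.toNat - 1) j.toNat) (mod_divide j (i + j - 1)))
                     (mod_multiply (aGet2 p i.toNat (j.toNat - 1)) (mod_divide i (i + j - 1))))) p) m) i 1 =
        P i 1) ∧
    (∀ i j, 2 ≤ i → i < k → 1 ≤ j → j < N →
      aGet2 ((PySem.List.pyRange 2 (k : Int) 1).foldl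
        (fun p i => (PySem.List.pyRange 2 (N : Int) 1).foldl
          (fun p j => aSet2 p i.toNat j.toNat
            (mod_add (mod_multiply (aGet2 p (i.toNat - 1) j.toNat) (mod_divide j (i + j - 1)))
                     (mod_multiply (aGet2 p i.toNat (j.toNat - 1)) (mod_divide i (i + j - 1))))) p) m) i j =
        P i j) := by
  intro k
  induction k with
  | zero =>
    intro _
    rw [PySem.List.pyRange_one_eq_nil (a := 2) (b := ((0 : Nat) : Int)) (by norm_num)]
    exact ⟨hsq, h1, h2, fun i j _ hik _ _ => absurd hik (by omega)⟩
  | succ k ih =>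
    intro hk
    by_cases h2k : 2 ≤ k
    · obtain ⟨is_, ia, ib, ic⟩ := ih (by omega)
      rw [show ((k + 1 : Nat) : Int) = (k : Int) + 1 by push_cast; ring,
        PySem.List.pyRange_one_succ_right (by exact_mod_cast h2k), List.foldl_append]
      simp only [List.foldl_cons, List.foldl_nil]
      have hrow : ∀ b, 1 ≤ b → b < N →
          aGet2 ((PySem.List.pyRange 2 (k : Int) 1).foldl
            (fun p i => (PySem.List.pyRange 2 (N : Int) 1).foldl
              (fun p j => aSet2 p i.toNat j.toNat
                (mod_add (mod_multiply (aGet2 p (i.toNat - 1) j.toNat) (mod_divide j (i + j - 1)))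
                         (mod_multiply (aGet2 p i.toNat (j.toNat - 1)) (mod_divide i (i + j - 1))))) p) m)
            (((k : Int)).toNat - 1) b = P (((k : Int)).toNat - 1) b := by
        intro b hb1 hb2
        rw [Int.toNat_natCast]
        by_cases hk3 : 3 ≤ k
        · exact ic (k - 1) b (by omega) (by omega) hb1 hb2
        · have hk2 : k = 2 := by omega
          subst hk2
          exact ia b hb1 hb2
      have hcol :
          aGet2 ((PySem.List.pyRange 2 (k : Int) 1).foldl
            (fun p i => (PySem.List.pyRange 2 (N : Int) 1).foldl
              (fun p j => aSet2 p i.toNat j.toNat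
                (mod_add (mod_multiply (aGet2 p (i.toNat - 1) j.toNat) (mod_divide j (i + j - 1)))
                         (mod_multiply (aGet2 p i.toNat (j.toNat - 1)) (mod_divide i (i + j - 1))))) p) m)
            ((k : Int)).toNat 1 = P ((k : Int)).toNat 1 := by
        rw [Int.toNat_natCast]
        exact ib k h2k (by omega)
      obtain ⟨gs, g1, g2⟩ := innerA N (k : Int) _ (by exact_mod_cast h2k)
        (by rw [Int.toNat_natCast]; omega) is_ hrow hcol N le_rfl
      simp only [Int.toNat_natCast] at gs g1 g2 ⊢
      refine ⟨gs, ?_, ?_, ?_⟩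
      · intro j hj1 hj2
        rw [g1 1 j (by omega)]
        exact ia j hj1 hj2
      · intro i hi1 hi2
        by_cases hik : i = k
        · subst hik
          exact g2 1 (by omega) (by omega)
        · rw [g1 i 1 hik]
          exact ib i hi1 hi2
      · intro i j hi1 hi2 hj1 hj2
        by_cases hik : i = k
        · subst hik
          exact g2 j hj1 hj2
        · rw [g1 i j hik]
          exact ic i j hi1 (by omega) hj1 hj2
    · rw [show ((k + 1 : Nat) : Int) = (k : Int) + 1 by push_cast; ring,
        PySem.List.pyRange_one_eq_nil (a := 2) (b := ((k : Int) + 1))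
        (by exact_mod_cast (by omega : ((k : Int) + 1) ≤ 2))]
      exact ⟨hsq, h1, h2, fun i j hi2 hik _ _ => absurd hik (by omega)⟩

theorem aFill_spec (t : Int) (ht : 2 ≤ t) (i j : Nat)
    (hi1 : 1 ≤ i) (hi2 : (i : Int) ≤ t) (hj1 : 1 ≤ j) (hj2 : (j : Int) ≤ t) :
    aGet2 (aFill t) i j = P i j := by
  have hN : (((t + 1).toNat : Nat) : Int) = t + 1 := Int.toNat_of_nonneg (by omega)
  obtain ⟨hbs, hb1, hb2⟩ := aBase_spec t ht
  have h1 : ∀ j, 1 ≤ j → j < (t + 1).toNat → aGet2 (aBase t) 1 j = P 1 j :=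
    fun j a b => hb1 j a (by omega)
  have h2 : ∀ i, 2 ≤ i → i < (t + 1).toNat → aGet2 (aBase t) i 1 = P i 1 :=
    fun i a b => hb2 i a (by omega)
  obtain ⟨gs, ga, gb, gc⟩ := outerA (t + 1).toNat (aBase t) hbs h1 h2 (t + 1).toNat le_rfl
  unfold aFill
  rw [show PySem.List.pyRange 2 (t + 1) 1 =
    PySem.List.pyRange 2 (((t + 1).toNat : Nat) : Int) 1 by rw [hN]]
  by_cases hi : i = 1
  · subst hi
    exact ga j hj1 (by omega)
  · exact gc i j (by omega) (by omega) hj1 (by omega)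

-- ---- B side ----

theorem foldWrite (v : Int → Int) :
    ∀ (n : Nat) (c : List Int), n ≤ c.length →
    ((PySem.List.pyRange 1 (n : Int) 1).foldl (fun c i => bSet c i.toNat (v i)) c).length = c.length ∧
    ∀ a : Nat,
      bGet ((PySem.List.pyRange 1 (n : Int) 1).foldl (fun c i => bSet c i.toNat (v i)) c) a =
      if 1 ≤ a ∧ a < n then v (a : Int) else bGet c a := by
  intro n
  induction n with
  | zero =>
    intro c _
    rw [PySem.List.pyRange_one_eq_nil (by norm_num)]
    simp only [List.foldl_nil]
    exact ⟨trivial, fun a => by rw [if_neg (by omega)]⟩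
  | succ n ih =>
    intro c hn
    by_cases h1 : 1 ≤ n
    · obtain ⟨ihl, ihg⟩ := ih c (by omega)
      rw [show ((n + 1 : Nat) : Int) = (n : Int) + 1 by push_cast; ring,
        PySem.List.pyRange_one_succ_right (by exact_mod_cast h1), List.foldl_append]
      simp only [List.foldl_cons, List.foldl_nil, Int.toNat_natCast]
      refine ⟨by rw [length_bSet, ihl], fun a => ?_⟩
      by_cases ha : a = n
      · subst ha
        rw [bGet_bSet_eq (by omega) _, if_pos ⟨h1, by omega⟩]
      · rw [bGet_bSet_ne ha _, ihg a]
        split_ifs with h1' h2' <;> try rfl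
        · omega
        · omega
    · rw [PySem.List.pyRange_one_eq_nil (by exact_mod_cast (by omega : ((n : Int) + 1) ≤ 1))]
      simp only [List.foldl_nil]
      exact ⟨trivial, fun a => by rw [if_neg (by omega)]⟩

theorem diagB (d R : Nat) (prev : List Int) (hd : 2 ≤ d) (hdR : d ≤ R)
    (hprev : ∀ a, 1 ≤ a → a ≤ d - 2 → bGet prev a = P a (d - 1 - a)) (a : Nat)
    (ha1 : 1 ≤ a) (ha2 : a ≤ d - 1) :
    bGet ((PySem.List.pyRange 1 (d : Int) 1).foldl
      (fun cur i =>
        bSet cur i.toNat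
          (if i = 1 ∧ (d : Int) - i = 1 then 1
           else if i = 1 then mod_divide 1 (fact_mod ((d : Int) - i))
           else if (d : Int) - i = 1 then mod_divide 1 (fact_mod i)
           else mod_add (mod_multiply (bGet prev (i.toNat - 1)) (mod_divide ((d : Int) - i) ((d : Int) - 1)))
                        (mod_multiply (bGet prev i.toNat) (mod_divide i ((d : Int) - 1)))))
      (List.replicate R 0)) a = P a (d - a) := by
  obtain ⟨-, hg⟩ := foldWrite
    (fun i => (if i = 1 ∧ (d : Int) - i = 1 then 1
      else if i = 1 then mod_divide 1 (fact_mod ((d : Int) - i))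
      else if (d : Int) - i = 1 then mod_divide 1 (fact_mod i)
      else mod_add (mod_multiply (bGet prev (i.toNat - 1)) (mod_divide ((d : Int) - i) ((d : Int) - 1)))
                   (mod_multiply (bGet prev i.toNat) (mod_divide i ((d : Int) - 1)))))
    d (List.replicate R 0) (by simp; omega)
  rw [hg a, if_pos ⟨ha1, by omega⟩]
  simp only [Int.toNat_natCast]
  by_cases ha : a = 1
  · subst ha
    simp only [Nat.cast_one]
    by_cases hd2 : d = 2
    · subst hd2
      rw [if_pos ⟨trivial, by norm_num⟩]
      norm_num [P_one_one]
    · rw [if_neg (by simp; omega), if_pos trivial, P_one (d - 1) (by omega),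
        show ((d - 1 : Nat) : Int) = (d : Int) - 1 by omega]
  · by_cases hda : a = d - 1
    · rw [if_neg (by omega), if_neg (by omega), if_pos (by omega),
        show d - a = 1 by omega, P_one' a (by omega)]
    · rw [if_neg (by omega), if_neg (by omega), if_neg (by omega),
        P_rec a (d - a) (by omega) (by omega),
        hprev (a - 1) (by omega) (by omega), hprev a ha1 (by omega),
        show d - 1 - (a - 1) = d - a by omega, show d - 1 - a = d - a - 1 by omega,
        show ((d - a : Nat) : Int) = (d : Int) - (a : Int) by omega,
        show ((a : Nat) : Int) + ((d : Int) - (a : Int)) - 1 = (d : Int) - 1 by ring]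

theorem outerB (R : Nat) : ∀ n : Nat, 3 ≤ n → n ≤ R + 1 → ∀ a : Nat, 1 ≤ a → a ≤ n - 2 →
    bGet ((PySem.List.pyRange 2 (n : Int) 1).foldl
      (fun prev d =>
        (PySem.List.pyRange 1 d 1).foldl
          (fun cur i =>
            bSet cur i.toNat
              (if i = 1 ∧ d - i = 1 then 1
               else if i = 1 then mod_divide 1 (fact_mod (d - i))
               else if d - i = 1 then mod_divide 1 (fact_mod i)
               else mod_add (mod_multiply (bGet prev (i.toNat - 1)) (mod_divide (d - i) (d - 1)))
                            (mod_multiply (bGet prev i.toNat) (mod_divide i (d - 1)))))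
          (List.replicate R 0))
      (List.replicate R 0)) a = P a ((n - 1) - a) := by
  intro n
  induction n with
  | zero => intro h3; omega
  | succ n ih =>
    intro h3 hnR a ha1 ha2
    by_cases hn3 : 3 ≤ n
    · rw [show ((n + 1 : Nat) : Int) = (n : Int) + 1 by push_cast; ring,
        PySem.List.pyRange_one_succ_right (by exact_mod_cast (by omega : (2 : Int) ≤ (n : Int))),
        List.foldl_append]
      simp only [List.foldl_cons, List.foldl_nil]
      have hprev : ∀ b, 1 ≤ b → b ≤ n - 2 → _ := fun b hb1 hb2 => ih hn3 (by omega) b hb1 hb2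
      rw [show n + 1 - 1 - a = n - a by omega]
      exact diagB n R _ (by omega) (by omega) hprev a ha1 (by omega)
    · have hn2 : n = 2 := by omega
      subst hn2
      rw [show ((2 + 1 : Nat) : Int) = (2 : Int) + 1 by norm_num,
        PySem.List.pyRange_one_succ_right (by norm_num), PySem.List.pyRange_one_eq_nil le_rfl,
        List.nil_append, List.foldl_cons, List.foldl_nil]
      have ha : a = 1 := by omega
      subst ha
      have h := diagB 2 R (List.replicate R 0) le_rfl (by omega)
        (fun b hb1 hb2 => absurd hb2 (by omega)) 1 le_rfl le_rfl
      exact_mod_cast h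

theorem bDiag_spec (t : Int) (ht : 2 ≤ t) (a : Nat)
    (ha1 : 1 ≤ a) (ha2 : (a : Int) ≤ t - 1) :
    bGet (bDiag t) a = P a (t.toNat - a) := by
  have hN : (((t + 1).toNat : Nat) : Int) = t + 1 := Int.toNat_of_nonneg (by omega)
  have h := outerB (t + 1).toNat (t + 1).toNat (by omega) (by omega) a ha1 (by omega)
  rw [show (t + 1).toNat - 1 - a = t.toNat - a by omega] at h
  unfold bDiag
  rw [show PySem.List.pyRange 2 (t + 1) 1 =
    PySem.List.pyRange 2 (((t + 1).toNat : Nat) : Int) 1 by rw [hN]]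
  exact h

-- ---- final equality ----

theorem main_eq (t : Int) (ht : 2 ≤ t) : calc_variance t = calc_variance_alt t := by
  unfold calc_variance calc_variance_alt
  apply PySem.List.foldl_congr_mem
  intro acc y hy
  rw [PySem.List.mem_pyRange_iff_of_pos (by norm_num)] at hy
  obtain ⟨h1, h2, c, hc⟩ := hy
  have hk1 : PySem.Int.floordiv (t + y) 2 = c + 1 := by
    rw [PySem.Int.floordiv_eq_iff_of_pos (by norm_num)]; omega
  have hk2 : PySem.Int.floordiv (t - y) 2 = t - (c + 1) := by
    rw [PySem.Int.floordiv_eq_iff_of_pos (by norm_num)]; omega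
  simp only [hk1, hk2]
  rw [aFill_spec t ht (c + 1).toNat (t - (c + 1)).toNat (by omega) (by omega) (by omega) (by omega),
    bDiag_spec t ht (c + 1).toNat (by omega) (by omega),
    show (t - (c + 1)).toNat = t.toNat - (c + 1).toNat by omega, pow_two]

-- ===== VERDICT (by name: the statement is the Claim_ definition above) =====
theorem calc_variance_spec : Claim_equal_calc_variance := by
  intro t _ hpre
  unfold Spec_calc_variance
  exact main_eq t hpre
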